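-- pv_equiv track=rewrite | github.com/spoonbobo/arc2024 | curriculum/arcdsl.py | vperiod
-- ===== SOURCE A (Python) =====
-- from typing import (
--     Any,
--     Tuple,
--     FrozenSet,
--     Callable,
--     Container,
--     Union
-- )
--
-- def height(
--     piece: Union[Tuple[Tuple[int]], Union[FrozenSet[Tuple[int, Tuple[int, int]]], FrozenSet[Tuple[int, int]]]]
-- ) -> int:
--     """ height of grid or patch """
--     if len(piece) == 0:
--         return 0
--     if isinstance(piece, tuple):
--         return len(piece)
--     return lowermost(piece) - uppermost(piece) + 1
--
-- def toindices(
--     patch: Union[FrozenSet[Tuple[int, Tuple[int, int]]], FrozenSet[Tuple[int, int]]]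
-- ) -> FrozenSet[Tuple[int, int]]:
--     """ indices of object cells """
--     if len(patch) == 0:
--         return frozenset()
--     if isinstance(next(iter(patch))[1], tuple):
--         return frozenset(index for value, index in patch)
--     return patch
--
-- def shift(
--     patch: Union[FrozenSet[Tuple[int, Tuple[int, int]]], FrozenSet[Tuple[int, int]]],
--     directions: Tuple[int, int]
-- ) -> Union[FrozenSet[Tuple[int, Tuple[int, int]]], FrozenSet[Tuple[int, int]]]:
--     """ shift patch """
--     if len(patch) == 0:
--         return patch
--     di, dj = directions
--     if isinstance(next(iter(patch))[1], tuple):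
--         return frozenset((value, (i + di, j + dj)) for value, (i, j) in patch)
--     return frozenset((i + di, j + dj) for i, j in patch)
--
-- def normalize(
--     patch: Union[FrozenSet[Tuple[int, Tuple[int, int]]], FrozenSet[Tuple[int, int]]]
-- ) -> Union[FrozenSet[Tuple[int, Tuple[int, int]]], FrozenSet[Tuple[int, int]]]:
--     """ moves upper left corner to origin """
--     if len(patch) == 0:
--         return patch
--     return shift(patch, (-uppermost(patch), -leftmost(patch)))
--
-- def uppermost(
--     patch: Union[FrozenSet[Tuple[int, Tuple[int, int]]], FrozenSet[Tuple[int, int]]]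
-- ) -> int:
--     """ row index of uppermost occupied cell """
--     return min(i for i, j in toindices(patch))
--
-- def lowermost(
--     patch: Union[FrozenSet[Tuple[int, Tuple[int, int]]], FrozenSet[Tuple[int, int]]]
-- ) -> int:
--     """ row index of lowermost occupied cell """
--     return max(i for i, j in toindices(patch))
--
-- def leftmost(
--     patch: Union[FrozenSet[Tuple[int, Tuple[int, int]]], FrozenSet[Tuple[int, int]]]
-- ) -> int:
--     """ column index of leftmost occupied cell """
--     return min(j for i, j in toindices(patch))
--
-- def vperiod(
--     obj: FrozenSet[Tuple[int, Tuple[int, int]]]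
-- ) -> int:
--     """ vertical periodicity """
--     normalized = normalize(obj)
--     h = height(normalized)
--     for p in range(1, h):
--         offsetted = shift(normalized, (-p, 0))
--         pruned = frozenset({(c, (i, j)) for c, (i, j) in offsetted if i >= 0})
--         if pruned.issubset(normalized):
--             return p
--     return h
-- ===== SOURCE B (Python) =====
-- def vperiod(obj):
--     """ vertical periodicity """
--     if not obj:
--         return 0
--     rows = {}
--     for c, (i, j) in obj:
--         rows.setdefault(i, set()).add((c, j))
--     minr = min(rows)
--     h = max(rows) - minr + 1
--     for p in range(1, h):
--         if all(i - minr < p or cells <= rows.get(i - p, set())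
--                for i, cells in rows.items()):
--             return p
--     return h
-- ===== Notes on version B (the rewrite author's own statement) =====
-- stated objective: faster
-- what changed: Instead of normalizing the patch and, for each candidate period, building a shifted and pruned frozenset and testing frozenset inclusion, B groups the cells once into a dict from raw row index to the set of (value, column) pairs and tests each candidate period by per-row subset checks (with short-circuiting) against the bucket p rows above, never normalizing or shifting columns at all.
import Mathlib
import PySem

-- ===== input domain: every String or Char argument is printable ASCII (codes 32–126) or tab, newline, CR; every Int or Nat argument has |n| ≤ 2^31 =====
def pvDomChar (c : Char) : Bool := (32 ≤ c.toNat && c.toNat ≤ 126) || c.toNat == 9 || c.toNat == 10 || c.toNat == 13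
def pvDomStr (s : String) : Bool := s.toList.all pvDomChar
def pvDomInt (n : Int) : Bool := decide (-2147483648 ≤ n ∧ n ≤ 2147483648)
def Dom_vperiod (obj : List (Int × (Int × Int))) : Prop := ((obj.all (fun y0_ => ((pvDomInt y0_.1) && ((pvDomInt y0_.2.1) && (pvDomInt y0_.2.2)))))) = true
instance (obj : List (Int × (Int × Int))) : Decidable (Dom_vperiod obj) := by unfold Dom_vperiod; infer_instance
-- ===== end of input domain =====

-- B replaces A's per-period shifted/pruned frozenset construction by a row index built once
-- (row -> set of (value, column) pairs) with short-circuiting per-row subset checks; measured faster in a timing run.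


-- ===== PORT A =====
-- Python's min(...)/max(...) over a nonempty iterable; the `.getD 0` default is unreachable
-- (every call site is guarded by an emptiness check, as in the Python).
def pvMin (xs : List Int) : Int := (PySem.List.min? xs (fun y => y)).getD 0
def pvMax (xs : List Int) : Int := (PySem.List.max? xs (fun y => y)).getD 0

def pvToindices (patch : List (Int × (Int × Int))) : PySem.Set (Int × Int) :=
  PySem.Set.ofList (patch.map (·.2))

def pvUppermost (patch : List (Int × (Int × Int))) : Int :=
  pvMin ((pvToindices patch).map (·.1))

def pvLowermost (patch : List (Int × (Int × Int))) : Int :=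
  pvMax ((pvToindices patch).map (·.1))

def pvLeftmost (patch : List (Int × (Int × Int))) : Int :=
  pvMin ((pvToindices patch).map (·.2))

def pvShift (patch : List (Int × (Int × Int))) (dir : Int × Int) : List (Int × (Int × Int)) :=
  if patch.isEmpty then patch
  else patch.map (fun x => (x.1, (x.2.1 + dir.1, x.2.2 + dir.2)))

def pvNormalize (patch : List (Int × (Int × Int))) : List (Int × (Int × Int)) :=
  if patch.isEmpty then patch
  else pvShift patch (-(pvUppermost patch), -(pvLeftmost patch))

def pvHeight (piece : List (Int × (Int × Int))) : Int :=
  if piece.isEmpty then 0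
  else pvLowermost piece - pvUppermost piece + 1

def pvCondA (normalized : List (Int × (Int × Int))) (p : Int) : Bool :=
  PySem.Set.issubset
    (PySem.Set.ofList ((pvShift normalized (-p, 0)).filter (fun x => decide (0 ≤ x.2.1))))
    normalized

def pvLoopA (normalized : List (Int × (Int × Int))) (h : Int) : List Int → Int
  | [] => h
  | p :: rest => if pvCondA normalized p then p else pvLoopA normalized h rest

def vperiod (obj : List (Int × (Int × Int))) : Int :=
  let normalized := pvNormalize obj
  let h := pvHeight normalized
  pvLoopA normalized h (PySem.List.pyRange 1 h 1)

-- ===== PORT B =====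
def pvRowsStep (d : PySem.Dict Int (PySem.Set (Int × Int))) (x : Int × (Int × Int)) :
    PySem.Dict Int (PySem.Set (Int × Int)) :=
  d.modify x.2.1 PySem.Set.empty (fun s => PySem.Set.add s (x.1, x.2.2))

def pvRows (obj : List (Int × (Int × Int))) : PySem.Dict Int (PySem.Set (Int × Int)) :=
  obj.foldl pvRowsStep PySem.Dict.empty

def pvCondB (rows : PySem.Dict Int (PySem.Set (Int × Int))) (minr p : Int) : Bool :=
  rows.items.all (fun it =>
    decide (it.1 - minr < p) ||
    PySem.Set.issubset it.2 (rows.getD (it.1 - p) PySem.Set.empty))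

def pvLoopB (rows : PySem.Dict Int (PySem.Set (Int × Int))) (minr h : Int) : List Int → Int
  | [] => h
  | p :: rest => if pvCondB rows minr p then p else pvLoopB rows minr h rest

def vperiod_alt (obj : List (Int × (Int × Int))) : Int :=
  if obj.isEmpty then 0
  else
    let rows := pvRows obj
    let minr := pvMin rows.keys
    let h := pvMax rows.keys - minr + 1
    pvLoopB rows minr h (PySem.List.pyRange 1 h 1)

-- ===== PRECONDITION & SPEC =====
def Spec_vperiod (obj : List (Int × (Int × Int))) (out : Int) : Prop := out = vperiod_alt obj
instance (obj : List (Int × (Int × Int))) (out : Int) : Decidable (Spec_vperiod obj out) := by unfold Spec_vperiod; infer_instance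

-- ===== CLAIM (what is proved, stated in full; the proofs are below) =====
def Claim_equal_vperiod : Prop := ∀ (obj : List (Int × (Int × Int))), Dom_vperiod obj → Spec_vperiod obj (vperiod obj)

-- ===== LEMMAS AND PROOFS =====

lemma pvMin_spec (xs : List Int) (h : xs ≠ []) : pvMin xs ∈ xs ∧ ∀ y ∈ xs, pvMin xs ≤ y := by
  unfold pvMin
  rcases hm : PySem.List.min? xs (fun y => y) with _ | m
  · exact absurd ((PySem.List.min?_eq_none_iff xs _).1 hm) h
  · exact ⟨by simpa using PySem.List.min?_mem hm, by simpa using PySem.List.min?_isMin hm⟩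

lemma pvMax_spec (xs : List Int) (h : xs ≠ []) : pvMax xs ∈ xs ∧ ∀ y ∈ xs, y ≤ pvMax xs := by
  unfold pvMax
  rcases hm : PySem.List.max? xs (fun y => y) with _ | m
  · exact absurd ((PySem.List.max?_eq_none_iff xs _).1 hm) h
  · exact ⟨by simpa using PySem.List.max?_mem hm, by simpa using PySem.List.max?_isMax hm⟩

lemma pvMin_eq_of_spec (xs : List Int) (m : Int) (hm : m ∈ xs) (hb : ∀ y ∈ xs, m ≤ y) :
    pvMin xs = m := by
  obtain ⟨h1, h2⟩ := pvMin_spec xs (List.ne_nil_of_mem hm)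
  exact le_antisymm (h2 m hm) (hb _ h1)

lemma pvMax_eq_of_spec (xs : List Int) (m : Int) (hm : m ∈ xs) (hb : ∀ y ∈ xs, y ≤ m) :
    pvMax xs = m := by
  obtain ⟨h1, h2⟩ := pvMax_spec xs (List.ne_nil_of_mem hm)
  exact le_antisymm (hb _ h1) (h2 m hm)

-- membership in a row bucket of the index B builds
lemma pvRows_getD_mem_aux (l : List (Int × (Int × Int))) (d : PySem.Dict Int (PySem.Set (Int × Int)))
    (k : Int) (y : Int × Int) :
    (y ∈ (l.foldl pvRowsStep d).getD k PySem.Set.empty) ↔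
      ((y.1, (k, y.2)) ∈ l ∨ y ∈ d.getD k PySem.Set.empty) := by
  induction l generalizing d with
  | nil => simp
  | cons x l ih =>
    rw [List.foldl_cons, ih]
    have hstep : (pvRowsStep d x).getD k PySem.Set.empty =
        if k = x.2.1 then PySem.Set.add (d.getD x.2.1 PySem.Set.empty) (x.1, x.2.2)
        else d.getD k PySem.Set.empty := by
      unfold pvRowsStep PySem.Dict.modify
      exact PySem.Dict.getD_insert d x.2.1 k _ _
    rw [hstep]
    by_cases hk : k = x.2.1
    · subst hk
      rw [if_pos rfl, PySem.Set.mem_add, List.mem_cons]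
      constructor
      · rintro (h | h | rfl)
        · exact Or.inl (Or.inr h)
        · exact Or.inr h
        · exact Or.inl (Or.inl rfl)
      · rintro ((h | h) | h)
        · have h1 : y.1 = x.1 := congrArg Prod.fst h
          have h2 : y.2 = x.2.2 := congrArg (fun z => z.2.2) h
          exact Or.inr (Or.inr (Prod.ext h1 h2))
        · exact Or.inl h
        · exact Or.inr (Or.inl h)
    · rw [if_neg hk, List.mem_cons]
      constructor
      · rintro (h | h)
        · exact Or.inl (Or.inr h)
        · exact Or.inr h
      · rintro ((h | h) | h)
        · exact absurd (congrArg (fun z => z.2.1) h) hk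
        · exact Or.inl h
        · exact Or.inr h

lemma pvRows_getD_mem (obj : List (Int × (Int × Int))) (k : Int) (y : Int × Int) :
    (y ∈ (pvRows obj).getD k PySem.Set.empty) ↔ (y.1, (k, y.2)) ∈ obj := by
  unfold pvRows
  rw [pvRows_getD_mem_aux]
  simp [PySem.Dict.getD, PySem.Dict.get?, PySem.Dict.empty]

-- an items entry of a dict built by inserts carries exactly its get? value
def pvDictInv (d : PySem.Dict Int (PySem.Set (Int × Int))) : Prop :=
  ∀ k s, (k, s) ∈ d.items → d.get? k = some s

lemma pvDictInv_insert (d : PySem.Dict Int (PySem.Set (Int × Int))) (k : Int)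
    (v : PySem.Set (Int × Int)) (hd : pvDictInv d) : pvDictInv (d.insert k v) := by
  intro k' s' hmem
  rw [PySem.Dict.items_insert] at hmem
  rw [PySem.Dict.get?_insert]
  by_cases hc : d.contains k
  · rw [if_pos hc] at hmem
    obtain ⟨p, hp, hfp⟩ := List.mem_map.1 hmem
    by_cases hpk : (p.1 == k) = true
    · rw [if_pos hpk] at hfp
      have : k' = k ∧ s' = v := by
        constructor
        · exact (congrArg Prod.fst hfp).symm
        · exact (congrArg Prod.snd hfp).symm
      rw [if_pos this.1, this.2]
    · rw [if_neg hpk] at hfp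
      have hk' : k' = p.1 := (congrArg Prod.fst hfp).symm
      have hne : k' ≠ k := by
        intro h; exact hpk (by simp [← hk', h])
      rw [if_neg hne, hk']
      have : (p.1, s') ∈ d.items := by
        have hs' : s' = p.2 := (congrArg Prod.snd hfp).symm
        rw [hs']; exact hp
      exact hd _ _ this
  · rw [if_neg hc] at hmem
    rcases List.mem_append.1 hmem with h | h
    · have hne : k' ≠ k := by
        intro he; subst he
        exact hc (List.any_eq_true.2 ⟨(k', s'), h, by simp⟩)
      rw [if_neg hne]
      exact hd _ _ h
    · have : k' = k ∧ s' = v := by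
        simp at h; exact ⟨h.1, h.2⟩
      rw [if_pos this.1, this.2]

lemma pvRows_items_get? (obj : List (Int × (Int × Int))) : pvDictInv (pvRows obj) := by
  unfold pvRows
  have : ∀ (l : List (Int × (Int × Int))) (d : PySem.Dict Int (PySem.Set (Int × Int))),
      pvDictInv d → pvDictInv (l.foldl pvRowsStep d) := by
    intro l
    induction l with
    | nil => intro d hd; exact hd
    | cons x l ih =>
      intro d hd
      rw [List.foldl_cons]
      exact ih _ (pvDictInv_insert _ _ _ hd)
  apply this
  intro k s hmem
  simp [PySem.Dict.empty] at hmem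

lemma pvRows_keys (obj : List (Int × (Int × Int))) :
    (pvRows obj).keys = PySem.Set.ofList (obj.map (·.2.1)) := by
  have h := PySem.Dict.keys_foldl_modify_key obj (fun x => x.2.1) PySem.Set.empty
    (fun _ x => fun s => PySem.Set.add s (x.1, x.2.2)) PySem.Dict.empty
  unfold pvRows
  show (List.foldl (fun d x => d.modify x.2.1 PySem.Set.empty
      fun s => s.add (x.1, x.2.2)) PySem.Dict.empty obj).keys = _
  rw [h]
  rfl

-- the common mathematical condition both loop tests compute
def pvC (obj : List (Int × (Int × Int))) (minr p : Int) : Prop :=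
  ∀ x ∈ obj, p ≤ x.2.1 - minr → (x.1, (x.2.1 - p, x.2.2)) ∈ obj

lemma pvIssubset_iff {α : Type} [BEq α] [LawfulBEq α] (s t : PySem.Set α) :
    PySem.Set.issubset s t = true ↔ ∀ y ∈ s, y ∈ t := by
  simp [PySem.Set.issubset, PySem.Set.contains, List.all_eq_true]

lemma pvMin_congr (xs ys : List Int) (hmem : ∀ a, a ∈ xs ↔ a ∈ ys) (hy : ys ≠ []) :
    pvMin xs = pvMin ys := by
  obtain ⟨h1, h2⟩ := pvMin_spec ys hy
  exact pvMin_eq_of_spec xs (pvMin ys) ((hmem _).2 h1) (fun y hyx => h2 y ((hmem _).1 hyx))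

lemma pvMax_congr (xs ys : List Int) (hmem : ∀ a, a ∈ xs ↔ a ∈ ys) (hy : ys ≠ []) :
    pvMax xs = pvMax ys := by
  obtain ⟨h1, h2⟩ := pvMax_spec ys hy
  exact pvMax_eq_of_spec xs (pvMax ys) ((hmem _).2 h1) (fun y hyx => h2 y ((hmem _).1 hyx))

-- rows of A's toindices set are, as a membership predicate, the rows of the cell list
lemma pvToindices_rows_mem (patch : List (Int × (Int × Int))) (a : Int) :
    a ∈ (pvToindices patch).map (·.1) ↔ ∃ x ∈ patch, x.2.1 = a := by
  simp only [pvToindices, List.mem_map, PySem.Set.mem_ofList]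
  constructor
  · rintro ⟨pr, hpr, rfl⟩
    obtain ⟨x, hx, rfl⟩ := hpr
    exact ⟨x, hx, rfl⟩
  · rintro ⟨x, hx, rfl⟩
    exact ⟨x.2, ⟨x, hx, rfl⟩, rfl⟩

lemma pvUppermost_eq (patch : List (Int × (Int × Int))) (hp : patch ≠ []) :
    pvUppermost patch = pvMin (patch.map (·.2.1)) := by
  apply pvMin_congr
  · intro a
    rw [pvToindices_rows_mem]
    simp [List.mem_map]
  · simp [hp]

lemma pvCondB_iff (obj : List (Int × (Int × Int))) (minr p : Int) :
    pvCondB (pvRows obj) minr p = true ↔ pvC obj minr p := by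
  unfold pvCondB pvC
  rw [List.all_eq_true]
  constructor
  · intro hall x hx hp
    have hmem : (x.1, x.2.2) ∈ (pvRows obj).getD x.2.1 PySem.Set.empty := by
      rw [pvRows_getD_mem]; simpa using hx
    have hget : ∃ s, (pvRows obj).get? x.2.1 = some s ∧ (x.1, x.2.2) ∈ s := by
      rcases hg : (pvRows obj).get? x.2.1 with _ | s
      · rw [PySem.Dict.getD, hg] at hmem; simp [PySem.Set.empty] at hmem
      · exact ⟨s, rfl, by rwa [PySem.Dict.getD, hg] at hmem⟩
    obtain ⟨s, hg, hxs⟩ := hget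
    have hitems : (x.2.1, s) ∈ (pvRows obj).items := by
      unfold PySem.Dict.get? at hg
      obtain ⟨p', hp', hpk⟩ := Option.map_eq_some_iff.1 hg
      have hfst : p'.1 = x.2.1 := by simpa using List.find?_some hp'
      have : p' = (x.2.1, s) := Prod.ext hfst hpk
      rw [← this]; exact List.mem_of_find?_eq_some hp'
    have hit := hall _ hitems
    simp only [Bool.or_eq_true, decide_eq_true_eq] at hit
    rcases hit with h | h
    · omega
    · have := (pvIssubset_iff _ _).1 h (x.1, x.2.2) hxs
      have := (pvRows_getD_mem obj (x.2.1 - p) (x.1, x.2.2)).1 this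
      simpa using this
  · intro hC it hit
    by_cases hlt : it.1 - minr < p
    · simp [hlt]
    · simp only [Bool.or_eq_true, decide_eq_true_eq]
      right
      rw [pvIssubset_iff]
      intro y hy
      have hg : (pvRows obj).get? it.1 = some it.2 := pvRows_items_get? obj it.1 it.2 (by simpa using hit)
      have hy' : y ∈ (pvRows obj).getD it.1 PySem.Set.empty := by
        rw [PySem.Dict.getD, hg]; exact hy
      have hcell : (y.1, (it.1, y.2)) ∈ obj := (pvRows_getD_mem obj it.1 y).1 hy'
      have hcell2 := hC _ hcell (show p ≤ it.1 - minr by omega)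
      rw [pvRows_getD_mem]
      simpa using hcell2

lemma pvCondA_iff (obj : List (Int × (Int × Int))) (hobj : obj ≠ []) (p : Int) :
    pvCondA (pvNormalize obj) p = true ↔ pvC obj (pvUppermost obj) p := by
  have hne : obj.isEmpty = false := by simp [hobj]
  have hn : pvNormalize obj =
      obj.map (fun x => (x.1, (x.2.1 + -(pvUppermost obj), x.2.2 + -(pvLeftmost obj)))) := by
    unfold pvNormalize pvShift
    rw [hne]
    simp
  have hnne : (pvNormalize obj).isEmpty = false := by
    rw [hn]
    simp [hobj]
  have hshift : pvShift (pvNormalize obj) (-p, 0) =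
      (pvNormalize obj).map (fun z => (z.1, (z.2.1 + -p, z.2.2 + 0))) := by
    unfold pvShift
    rw [hnne]
    rfl
  unfold pvCondA pvC
  rw [hshift]
  refine Iff.trans (pvIssubset_iff _ _) ?_
  constructor
  · intro hsub x hx hp
    set U := pvUppermost obj with hU
    set L := pvLeftmost obj with hL
    have hz : (x.1, (x.2.1 + -U + -p, x.2.2 + -L + 0)) ∈
        PySem.Set.ofList (((pvNormalize obj).map (fun z => (z.1, (z.2.1 + -p, z.2.2 + 0)))).filter
          (fun z => decide (0 ≤ z.2.1))) := by
      rw [PySem.Set.mem_ofList, List.mem_filter]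
      constructor
      · rw [List.mem_map, hn]
        exact ⟨(x.1, (x.2.1 + -U, x.2.2 + -L)), List.mem_map_of_mem hx, rfl⟩
      · simp only [decide_eq_true_eq]
        omega
    have hin := hsub _ hz
    rw [hn] at hin
    obtain ⟨x', hx', he⟩ := List.mem_map.1 hin
    simp only [Prod.mk.injEq] at he
    obtain ⟨he1, he2, he3⟩ := he
    have hx'e : x' = (x.1, (x.2.1 - p, x.2.2)) := by
      refine Prod.ext he1 (Prod.ext ?_ ?_)
      · show x'.2.1 = x.2.1 - p
        omega
      · show x'.2.2 = x.2.2
        omega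
    rwa [← hx'e]
  · intro hC z hz
    rw [PySem.Set.mem_ofList, List.mem_filter] at hz
    obtain ⟨hzm, hz0⟩ := hz
    obtain ⟨w, hw, rfl⟩ := List.mem_map.1 hzm
    rw [hn] at hw
    obtain ⟨x, hx, rfl⟩ := List.mem_map.1 hw
    simp only [decide_eq_true_eq] at hz0
    have hcell := hC x hx (by omega)
    rw [hn]
    refine List.mem_map.2 ⟨(x.1, (x.2.1 - p, x.2.2)), hcell, ?_⟩
    refine Prod.ext rfl (Prod.ext ?_ ?_)
    · show x.2.1 - p + -(pvUppermost obj) = x.2.1 + -(pvUppermost obj) + -p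
      omega
    · show x.2.2 + -(pvLeftmost obj) = x.2.2 + -(pvLeftmost obj) + 0
      omega

lemma pvLoop_eq (n : List (Int × (Int × Int))) (rows : PySem.Dict Int (PySem.Set (Int × Int)))
    (minr h : Int) (ps : List Int)
    (hc : ∀ p ∈ ps, pvCondA n p = pvCondB rows minr p) :
    pvLoopA n h ps = pvLoopB rows minr h ps := by
  induction ps with
  | nil => rfl
  | cons p rest ih =>
    unfold pvLoopA pvLoopB
    rw [hc p (List.mem_cons_self ..)]
    split
    · rfl
    · exact ih (fun q hq => hc q (List.mem_cons_of_mem _ hq))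

-- ===== VERDICT (by name: the statement is the Claim_ definition above) =====
theorem vperiod_spec : Claim_equal_vperiod := by
  intro obj _
  unfold Spec_vperiod
  by_cases hobj : obj = []
  · subst hobj; rfl
  · have hne : obj.isEmpty = false := by simp [hobj]
    have hrs : obj.map (·.2.1) ≠ [] := by simp [hobj]
    set rs := obj.map (·.2.1) with hrsdef
    set U := pvMin rs with hUdef
    set M := pvMax rs with hMdef
    -- A's normalized patch and its extremal rows
    have hn : pvNormalize obj =
        obj.map (fun x => (x.1, (x.2.1 + -(pvUppermost obj), x.2.2 + -(pvLeftmost obj)))) := by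
      unfold pvNormalize pvShift
      rw [hne]
      simp
    have hnnil : pvNormalize obj ≠ [] := by rw [hn]; simp [hobj]
    have hnne : (pvNormalize obj).isEmpty = false := by simp [hnnil]
    have hUp : pvUppermost obj = U := pvUppermost_eq obj hobj
    have hUmem := pvMin_spec rs hrs
    have hMmem := pvMax_spec rs hrs
    have hrowsN : ∀ a, a ∈ (pvToindices (pvNormalize obj)).map (·.1) ↔
        ∃ x ∈ obj, x.2.1 + -(pvUppermost obj) = a := by
      intro a
      rw [pvToindices_rows_mem]
      constructor
      · rintro ⟨z, hz, rfl⟩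
        rw [hn] at hz
        obtain ⟨x, hx, rfl⟩ := List.mem_map.1 hz
        exact ⟨x, hx, rfl⟩
      · rintro ⟨x, hx, rfl⟩
        refine ⟨(x.1, (x.2.1 + -(pvUppermost obj), x.2.2 + -(pvLeftmost obj))), ?_, rfl⟩
        rw [hn]
        exact List.mem_map_of_mem hx
    -- uppermost of normalized = 0, lowermost = M - U
    have hUpN : pvUppermost (pvNormalize obj) = 0 := by
      apply pvMin_eq_of_spec
      · rw [hrowsN]
        obtain ⟨x, hx, hxe⟩ := List.mem_map.1 hUmem.1
        exact ⟨x, hx, by rw [hUp]; omega⟩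
      · intro y hy
        rw [hrowsN] at hy
        obtain ⟨x, hx, rfl⟩ := hy
        have := hUmem.2 x.2.1 (List.mem_map_of_mem hx)
        rw [hUp]
        omega
    have hLoN : pvLowermost (pvNormalize obj) = M - U := by
      apply pvMax_eq_of_spec
      · rw [hrowsN]
        obtain ⟨x, hx, hxe⟩ := List.mem_map.1 hMmem.1
        exact ⟨x, hx, by rw [hUp]; omega⟩
      · intro y hy
        rw [hrowsN] at hy
        obtain ⟨x, hx, rfl⟩ := hy
        have := hMmem.2 x.2.1 (List.mem_map_of_mem hx)
        rw [hUp]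
        omega
    have hhA : pvHeight (pvNormalize obj) = M - U + 1 := by
      unfold pvHeight
      rw [hnne]
      simp only [Bool.false_eq_true, if_false, hUpN, hLoN]
      omega
    -- B's keys and extrema
    have hkeysmem : ∀ a, a ∈ (pvRows obj).keys ↔ a ∈ rs := by
      intro a
      rw [pvRows_keys, PySem.Set.mem_ofList]
    have hkeysne : (pvRows obj).keys ≠ [] := by
      intro h
      have := (hkeysmem U).2 ((pvMin_spec rs hrs).1)
      rw [h] at this
      simp at this
    have hminB : pvMin (pvRows obj).keys = U := by
      rw [pvMin_congr _ rs hkeysmem hrs]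
    have hmaxB : pvMax (pvRows obj).keys = M := by
      rw [pvMax_congr _ rs hkeysmem hrs]
    -- evaluate both sides
    show pvLoopA (pvNormalize obj) (pvHeight (pvNormalize obj))
        (PySem.List.pyRange 1 (pvHeight (pvNormalize obj)) 1) = _
    rw [vperiod_alt.eq_def, hne]
    simp only [Bool.false_eq_true, if_false]
    rw [hminB, hmaxB, hhA]
    apply pvLoop_eq
    intro p _
    have hA := pvCondA_iff obj hobj p
    have hB := pvCondB_iff obj U p
    rw [hUp] at hA
    have : (pvCondA (pvNormalize obj) p = true) ↔ (pvCondB (pvRows obj) U p = true) :=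
      hA.trans hB.symm
    exact Bool.eq_iff_iff.2 this
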